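-- pv_equiv track=rewrite | github.com/huangsam/python-algorithms | algorithms/string/choices.py | _permutations_wh
-- ===== SOURCE A (Python) =====
-- def _permutations_wh(content: str, r: int):
--     if r == 0:
--         return []
--     if r == 1:
--         return [ch for ch in content]
--     result = []
--     for ix, head in enumerate(content):
--         remainder = content[:ix] + content[ix + 1 :]
--         for rseq in _permutations_wh(remainder, r - 1):
--             result.append(head + rseq)
--     return result
-- ===== SOURCE B (Python) =====
-- def _permutations_wh(content: str, r: int):
--     if r <= 0:
--         return []
--     states = [("", content)]
--     for _ in range(r):
--         if not states:
--             break
--         new_states = []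
--         for prefix, remaining in states:
--             for ix, ch in enumerate(remaining):
--                 new_states.append((prefix + ch, remaining[:ix] + remaining[ix + 1:]))
--         states = new_states
--     return [prefix for prefix, _ in states]
-- ===== Notes on version B (the rewrite author's own statement) =====
-- stated objective: alternative
-- what changed: A's depth-first recursion (recurse on the remainder for each head) is replaced by an iterative breadth-first builder that keeps a list of (prefix, remaining) states and expands it level by level for r rounds; in-order expansion reproduces A's exact output order.
import Mathlib
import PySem

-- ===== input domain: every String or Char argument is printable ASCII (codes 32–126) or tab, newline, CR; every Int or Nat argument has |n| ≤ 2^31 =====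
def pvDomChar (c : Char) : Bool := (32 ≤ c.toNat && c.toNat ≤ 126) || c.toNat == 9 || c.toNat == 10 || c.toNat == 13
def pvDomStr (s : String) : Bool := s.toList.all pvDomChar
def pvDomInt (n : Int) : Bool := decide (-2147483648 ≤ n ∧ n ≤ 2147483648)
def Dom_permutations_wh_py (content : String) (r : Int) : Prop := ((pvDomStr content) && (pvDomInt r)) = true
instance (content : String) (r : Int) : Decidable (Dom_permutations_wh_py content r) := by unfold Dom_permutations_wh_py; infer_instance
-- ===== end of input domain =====

-- B replaces A's depth-first recursion by an iterative level-by-level builder of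
-- (prefix, remaining) states; same return values, alternative decomposition (no speed claim).
-- Both ports work on the character list (PySem's string representation) and wrap back to String at the end.

-- ===== PORT A =====
-- membership bound for Python's enumerate, cited by pvA's decreasing_by
theorem pvEnumMemBounds {α : Type} (cs : List α) (s : Int) (q : Int × α)
    (h : q ∈ PySem.List.enumerate cs s) : s ≤ q.1 ∧ q.1 < s + cs.length := by
  induction cs generalizing s with
  | nil => simp [PySem.List.enumerate] at h
  | cons c t ih =>
    simp only [PySem.List.enumerate, List.mem_cons] at h
    rcases h with h | h
    · subst h; simp
    · have := ih (s + 1) h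
      simp only [List.length_cons]
      push_cast
      omega

-- length of content[:ix] + content[ix+1:], cited by pvA's decreasing_by
theorem pvEraseLen (cs : List Char) (i : Int) (h0 : 0 ≤ i) (h : i < cs.length) :
    (PySem.List.slice cs none (some i) ++ PySem.List.slice cs (some (i + 1)) none).length
      < cs.length := by
  rw [PySem.List.slice_to cs h0, PySem.List.slice_from cs (by omega)]
  simp only [List.length_append, List.length_take, List.length_drop]
  omega

-- literal port of A's recursive _permutations_wh, on the character list
def pvA (content : List Char) (r : Int) : List (List Char) :=
  if r = 0 then []
  else if r = 1 then content.map (fun ch => [ch])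
  else
    (PySem.List.enumerate content).attach.foldl
      (fun result p =>
        let remainder := PySem.List.slice content none (some p.1.1) ++
                         PySem.List.slice content (some (p.1.1 + 1)) none
        result ++ (pvA remainder (r - 1)).map (fun rseq => p.1.2 :: rseq))
      []
termination_by content.length
decreasing_by
  have hb := pvEnumMemBounds content 0 p.1 p.2
  exact pvEraseLen content p.1.1 (by omega) (by omega)

def permutations_wh_py (content : String) (r : Int) : List String :=
  (pvA content.toList r).map (fun cs => String.ofList cs)

-- ===== PORT B =====
-- one round of Source B's inner two loops: expand every (prefix, remaining) state
def pvBexpand (states : List (List Char × List Char)) : List (List Char × List Char) :=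
  states.foldl
    (fun newStates st =>
      newStates ++ (PySem.List.enumerate st.2).map
        (fun q => (st.1 ++ [q.2],
                   PySem.List.slice st.2 none (some q.1) ++
                   PySem.List.slice st.2 (some (q.1 + 1)) none)))
    []

-- Source B's 'for _ in range(r): if not states: break; states = new_states'
def pvBloop : Nat → List (List Char × List Char) → List (List Char × List Char)
  | 0, states => states
  | rounds + 1, states => if states = [] then states else pvBloop rounds (pvBexpand states)

def permutations_wh_py_alt (content : String) (r : Int) : List String :=
  if r ≤ 0 then []
  else (pvBloop r.toNat [([], content.toList)]).map (fun st => String.ofList st.1)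

-- ===== PRECONDITION & SPEC =====
def Spec_permutations_wh_py (content : String) (r : Int) (out : List String) : Prop := out = permutations_wh_py_alt content r
instance (content : String) (r : Int) (out : List String) : Decidable (Spec_permutations_wh_py content r out) := by unfold Spec_permutations_wh_py; infer_instance

-- ===== CLAIM (what is proved, stated in full; the proofs are below) =====
def Claim_equal_permutations_wh_py : Prop := ∀ (content : String) (r : Int), Dom_permutations_wh_py content r → Spec_permutations_wh_py content r (permutations_wh_py content r)

-- ===== LEMMAS AND PROOFS =====

-- canonical recursion both ports are reduced to (proof-only)
def pvPerm : List Char → Nat → List (List Char)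
  | _, 0 => [[]]
  | cs, k + 1 =>
    (PySem.List.enumerate cs).flatMap
      (fun q => (pvPerm (PySem.List.slice cs none (some q.1) ++
                         PySem.List.slice cs (some (q.1 + 1)) none) k).map (q.2 :: ·))

theorem pvFlatMapAttach {α β : Type} (l : List α) (g : α → List β) :
    l.attach.flatMap (fun p => g p.1) = l.flatMap g := by
  conv_rhs => rw [← List.attach_map_subtype_val l]
  rw [List.flatMap_map]

theorem pvA_unfold (cs : List Char) (r : Int) (h0 : r ≠ 0) (h1 : r ≠ 1) :
    pvA cs r = (PySem.List.enumerate cs).flatMap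
      (fun q => (pvA (PySem.List.slice cs none (some q.1) ++
                      PySem.List.slice cs (some (q.1 + 1)) none) (r - 1)).map (q.2 :: ·)) := by
  rw [pvA, if_neg h0, if_neg h1, PySem.List.foldl_append_eq_flatMap, List.nil_append]
  exact pvFlatMapAttach (PySem.List.enumerate cs)
    (fun q => (pvA (PySem.List.slice cs none (some q.1) ++
                    PySem.List.slice cs (some (q.1 + 1)) none) (r - 1)).map (q.2 :: ·))

theorem pvEnum_map_snd {α : Type} : ∀ (cs : List α) (s : Int), (PySem.List.enumerate cs s).map Prod.snd = cs := by
  intro cs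
  induction cs with
  | nil => intro s; simp [PySem.List.enumerate]
  | cons c t ih => intro s; simp [PySem.List.enumerate, ih]

theorem pvPerm_one (cs : List Char) : pvPerm cs 1 = cs.map (fun c => [c]) := by
  have h1 : pvPerm cs 1 = (PySem.List.enumerate cs).flatMap (fun q => [[q.2]]) := by
    simp [pvPerm]
  rw [h1, ← List.map_eq_flatMap]
  conv_rhs => rw [← pvEnum_map_snd cs 0]
  rw [List.map_map]
  rfl

theorem pvA_nonpos : ∀ (n : Nat) (cs : List Char) (r : Int), cs.length ≤ n → r ≤ 0 → pvA cs r = [] := by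
  intro n
  induction n with
  | zero =>
    intro cs r hl hr
    have hcs : cs = [] := List.eq_nil_of_length_eq_zero (by omega)
    subst hcs
    rcases eq_or_ne r 0 with h | h
    · simp [pvA, h]
    · rw [pvA_unfold _ _ h (by omega)]
      simp [PySem.List.enumerate]
  | succ n ih =>
    intro cs r hl hr
    rcases eq_or_ne r 0 with h | h
    · simp [pvA, h]
    · rw [pvA_unfold _ _ h (by omega)]
      rw [List.flatMap_eq_nil_iff]
      intro q hq
      have hb := pvEnumMemBounds cs 0 q hq
      rw [PySem.List.slice_to cs (by omega), PySem.List.slice_from cs (by omega)]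
      have hlen : ((cs.take q.1.toNat) ++ cs.drop (q.1 + 1).toNat).length ≤ n := by
        simp only [List.length_append, List.length_take, List.length_drop]
        omega
      rw [ih _ _ hlen (by omega)]
      simp

theorem pvA_eq_perm : ∀ (n : Nat) (cs : List Char) (r : Int), cs.length ≤ n → 1 ≤ r → pvA cs r = pvPerm cs r.toNat := by
  intro n
  induction n with
  | zero =>
    intro cs r hl hr
    have hcs : cs = [] := List.eq_nil_of_length_eq_zero (by omega)
    subst hcs
    rcases eq_or_ne r 1 with h | h
    · subst h
      rw [pvA, if_neg one_ne_zero, if_pos rfl, show ((1:Int)).toNat = 1 from rfl, pvPerm_one]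
    · rw [pvA_unfold _ _ (by omega) h]
      have hk : r.toNat = (r.toNat - 1) + 1 := by omega
      rw [hk]
      simp [pvPerm, PySem.List.enumerate]
  | succ n ih =>
    intro cs r hl hr
    rcases eq_or_ne r 1 with h | h
    · subst h
      rw [pvA, if_neg one_ne_zero, if_pos rfl, show ((1:Int)).toNat = 1 from rfl, pvPerm_one]
    · rw [pvA_unfold _ _ (by omega) h]
      have hk : r.toNat = (r.toNat - 1) + 1 := by omega
      rw [hk, pvPerm]
      apply List.flatMap_congr
      intro q hq
      have hb := pvEnumMemBounds cs 0 q hq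
      have hlen : (PySem.List.slice cs none (some q.1) ++
          PySem.List.slice cs (some (q.1 + 1)) none).length ≤ n := by
        rw [PySem.List.slice_to cs (by omega), PySem.List.slice_from cs (by omega)]
        simp only [List.length_append, List.length_take, List.length_drop]
        omega
      rw [ih _ _ hlen (by omega), show (r - 1).toNat = r.toNat - 1 from by omega]

theorem pvBexpand_eq (states : List (List Char × List Char)) :
    pvBexpand states = states.flatMap
      (fun st => (PySem.List.enumerate st.2).map
        (fun q => (st.1 ++ [q.2],
                   PySem.List.slice st.2 none (some q.1) ++
                   PySem.List.slice st.2 (some (q.1 + 1)) none))) := by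
  rw [pvBexpand, PySem.List.foldl_append_eq_flatMap]
  simp

theorem pvBloop_fst : ∀ (k : Nat) (states : List (List Char × List Char)),
    (pvBloop k states).map Prod.fst
      = states.flatMap (fun st => (pvPerm st.2 k).map (st.1 ++ ·)) := by
  intro k
  induction k with
  | zero =>
    intro states
    simp only [pvBloop]
    rw [List.map_eq_flatMap]
    apply List.flatMap_congr
    intro st _
    simp [pvPerm]
  | succ k ih =>
    intro states
    rcases eq_or_ne states [] with h | h
    · subst h; simp [pvBloop]
    · rw [pvBloop, if_neg h, ih, pvBexpand_eq, List.flatMap_assoc]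
      apply List.flatMap_congr
      intro st _
      rw [List.flatMap_map]
      simp only [pvPerm, List.map_flatMap, List.map_map]
      apply List.flatMap_congr
      intro q _
      simp [Function.comp, List.append_assoc]

-- ===== VERDICT (by name: the statement is the Claim_ definition above) =====
theorem permutations_wh_py_spec : Claim_equal_permutations_wh_py := by
  intro content r _
  unfold Spec_permutations_wh_py permutations_wh_py permutations_wh_py_alt
  by_cases hr : r ≤ 0
  · rw [if_pos hr, pvA_nonpos content.toList.length content.toList r le_rfl hr]
    simp
  · rw [if_neg hr, pvA_eq_perm content.toList.length content.toList r le_rfl (by omega)]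
    rw [show (fun st : List Char × List Char => String.ofList st.1)
          = (fun cs => String.ofList cs) ∘ Prod.fst from rfl,
        ← List.map_map, pvBloop_fst]
    simp
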